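-- pv_equiv track=rewrite | github.com/sboomi/advent-of-code | code/2021/python/src/day9.py | find_basin_size_list
-- ===== SOURCE A (Python) =====
-- from typing import List, Tuple
--
-- def check_neighbors(heightmap: List[List[int]], current_point: Tuple[int, int], lims: Tuple[int, int]) -> List[int]:
--     """Takes a heightmap and returns a list of all the neighbors located left, right, up and down the current point.
--
--     It needs the map, current position (x, y) and map boundaries (n_rows, n_cols).
--     The function checks out-of-bounds neighbors and assign -1 to the position if that's the case.
--
--     Parameters
--     ----------
--     heightmap : List[List[int]]
--         [description]
--     current_point : Tuple[int, int]
--         [description]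
--     lims : Tuple[int, int]
--         [description]
--
--     Returns
--     -------
--     List[int]
--         [description]
--     """
--     x, y = current_point
--     n_rows, n_cols = lims
--
--     top = -1 if y - 1 < 0 else heightmap[y - 1][x]
--     bottom = -1 if y + 1 >= n_rows else heightmap[y + 1][x]
--     left = -1 if x - 1 < 0 else heightmap[y][x - 1]
--     right = -1 if x + 1 >= n_cols else heightmap[y][x + 1]
--
--     return [neighbor for neighbor in [top, right, bottom, left] if neighbor != -1]
--
-- def determine_basin_size(
--     basin_points: List[Tuple[int, int]], heightmap: List[List[int]], points_visited: List[Tuple[int, int]] = []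
-- ) -> int:
--     n_rows = len(heightmap)
--     n_cols = len(heightmap[0])
--
--     if not basin_points:
--         return len(points_visited)
--     else:
--         x, y = basin_points[0]
--         if 0 <= x < n_cols and 0 <= y < n_rows and heightmap[y][x] != 9:
--             points_visited.append((x, y))
--             basin_points = basin_points[1:] + [(x + 1, y), (x - 1, y), (x, y + 1), (x, y - 1)]
--         else:
--             basin_points = basin_points[1:]
--
--         return determine_basin_size(
--             [point for point in basin_points if point not in points_visited], heightmap, points_visited=points_visited
--         )
--
-- def find_basin_size_list(heightmap: List[List[int]]) -> List[int]:
--     low_points = []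
--     basin_size_list = []
--
--     n_rows = len(heightmap)
--     n_cols = len(heightmap[0])
--
--     for i, heightmap_row in enumerate(heightmap):
--         for j, hm_point in enumerate(heightmap_row):
--             neighbors = check_neighbors(heightmap, (j, i), (n_rows, n_cols))
--             is_lowest = all([neighbor > hm_point for neighbor in neighbors])
--             if is_lowest:
--                 low_points.append((j, i))
--
--     for point in low_points:
--         x, y = point
--         basin_size = determine_basin_size([(x, y)], heightmap, points_visited=[])
--         basin_size_list.append(basin_size)
--
--     return basin_size_list
-- ===== SOURCE B (Python) =====
-- from typing import List
--
-- def find_basin_size_list(heightmap: List[List[int]]) -> List[int]: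
--     # Low points by a direct 4-way comparison, then basin sizes by an
--     # iterative DFS flood fill with a visited set and an explicit stack.
--     n_rows = len(heightmap)
--     n_cols = len(heightmap[0])
--     lows = []
--     for y, row in enumerate(heightmap):
--         for x, h in enumerate(row):
--             low = ((y - 1 < 0 or heightmap[y - 1][x] > h)
--                    and (x + 1 >= n_cols or heightmap[y][x + 1] > h)
--                    and (y + 1 >= n_rows or heightmap[y + 1][x] > h)
--                    and (x - 1 < 0 or heightmap[y][x - 1] > h))
--             if low:
--                 lows.append((x, y))
--     sizes = []
--     for start in lows:
--         seen = set()
--         stack = [start]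
--         while stack:
--             p = stack.pop()
--             if p in seen:
--                 continue
--             x, y = p
--             if not (0 <= x < n_cols and 0 <= y < n_rows) or heightmap[y][x] == 9:
--                 continue
--             seen.add(p)
--             stack.extend([(x + 1, y), (x - 1, y), (x, y + 1), (x, y - 1)])
--         sizes.append(len(seen))
--     return sizes
-- ===== Notes on version B (the rewrite author's own statement) =====
-- stated objective: faster
-- what changed: Replaces A's recursive worklist (which re-filters the entire pending list against a growing visited list on every step) by an iterative stack-based DFS flood fill with a hash-set of visited cells, and computes the low-point test directly instead of building and filtering a neighbour list; Pre_ excludes empty or ragged heightmaps, on which A raises IndexError.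
-- intended difference: On heightmaps where some cell of height >= -1 has an in-bounds neighbour equal to -1 and all its other in-bounds neighbours are higher, A treats that -1 height as its out-of-bounds sentinel and reports the cell as an extra low point (an extra basin size in the list); B returns only the true low points' basin sizes, the intended value since a cell is not lower than a -1 neighbour. — e.g. on find_basin_size_list([[0, -1]]): A returns [2, 2], B returns [2]
import Mathlib
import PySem

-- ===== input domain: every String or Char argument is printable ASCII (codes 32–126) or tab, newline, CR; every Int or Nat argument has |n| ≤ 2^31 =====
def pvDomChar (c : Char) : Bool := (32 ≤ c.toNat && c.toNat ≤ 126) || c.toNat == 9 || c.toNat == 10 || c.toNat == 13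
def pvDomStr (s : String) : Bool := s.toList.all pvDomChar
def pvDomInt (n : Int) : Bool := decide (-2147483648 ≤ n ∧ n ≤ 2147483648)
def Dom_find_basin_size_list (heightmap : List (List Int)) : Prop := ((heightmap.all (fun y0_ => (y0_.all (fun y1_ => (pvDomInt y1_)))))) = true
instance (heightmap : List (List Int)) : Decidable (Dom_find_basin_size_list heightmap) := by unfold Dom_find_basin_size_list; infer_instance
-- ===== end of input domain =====

-- B replaces A's quadratic recursive worklist (which re-filters the whole pending list
-- against a visited list on every step) by an iterative DFS flood fill with a visited set,
-- and tests low points by a direct 4-way comparison; where a cell's only failing neighbour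
-- has height -1 (A's out-of-bounds sentinel) the low-point sets differ — stated in D_ below.

-- ===== PORT A =====
-- total form of heightmap[y][x]; within both algorithms every access is bounds-guarded with
-- a nonnegative index (on Pre_ inputs), so pyGet? reads exactly Python's value there.
def pvGrid (hm : List (List Int)) (y x : Int) : Int :=
  (PySem.List.pyGet? ((PySem.List.pyGet? hm y).getD []) x).getD 0

-- check_neighbors(heightmap, current_point, lims)
def pvA_check_neighbors (hm : List (List Int)) (current_point : Int × Int)
    (lims : Int × Int) : List Int :=
  let x := current_point.1
  let y := current_point.2
  let n_rows := lims.1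
  let n_cols := lims.2
  let top := if y - 1 < 0 then -1 else pvGrid hm (y - 1) x
  let bottom := if y + 1 ≥ n_rows then -1 else pvGrid hm (y + 1) x
  let left := if x - 1 < 0 then -1 else pvGrid hm y (x - 1)
  let right := if x + 1 ≥ n_cols then -1 else pvGrid hm y (x + 1)
  ([top, right, bottom, left]).filter (fun n => decide (n ≠ -1))

-- determine_basin_size(basin_points, heightmap, points_visited): Python's recursion, with a
-- fuel counter as the structural-termination guard (the fuel supplied by the caller is
-- proved sufficient, so the fuel-0 branch is never taken there).
def pvA_determine_basin_size (hm : List (List Int)) (n_rows n_cols : Int) :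
    Nat → List (Int × Int) → List (Int × Int) → Int
  | 0, _, points_visited => (points_visited.length : Int)
  | fuel + 1, basin_points, points_visited =>
    match basin_points with
    | [] => (points_visited.length : Int)
    | (x, y) :: rest =>
      if 0 ≤ x ∧ x < n_cols ∧ 0 ≤ y ∧ y < n_rows ∧ pvGrid hm y x ≠ 9 then
        let points_visited' := points_visited ++ [(x, y)]
        let basin_points' := rest ++ [(x + 1, y), (x - 1, y), (x, y + 1), (x, y - 1)]
        pvA_determine_basin_size hm n_rows n_cols fuel
          (basin_points'.filter (fun p => decide (p ∉ points_visited'))) points_visited'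
      else
        pvA_determine_basin_size hm n_rows n_cols fuel
          (rest.filter (fun p => decide (p ∉ points_visited))) points_visited

def find_basin_size_list (heightmap : List (List Int)) : List Int :=
  let n_rows : Int := (heightmap.length : Int)
  -- len(heightmap[0]); Python raises on [] (excluded by Pre_), headI gives [] there
  let n_cols : Int := (heightmap.headI.length : Int)
  let low_points : List (Int × Int) :=
    (PySem.List.enumerate heightmap).foldl (fun acc ir =>
      (PySem.List.enumerate ir.2).foldl (fun acc2 jp =>
        let neighbors := pvA_check_neighbors heightmap (jp.1, ir.1) (n_rows, n_cols)
        let is_lowest := neighbors.all (fun n => decide (n > jp.2))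
        if is_lowest then acc2 ++ [(jp.1, ir.1)] else acc2) acc) []
  low_points.foldl (fun acc p =>
    acc ++ [pvA_determine_basin_size heightmap n_rows n_cols
      (1 + 4 * (heightmap.length * heightmap.headI.length)) [(p.1, p.2)] []]) []

-- ===== PORT B =====
-- the while loop of Source B: the stack's top is the list HEAD here (Python pops from the END,
-- so extend([a,b,c,d]) puts d on top: pushed here as d::c::b::a::stack); seen is a PySem.Set.
def pvB_fill (hm : List (List Int)) (n_rows n_cols : Int) :
    Nat → List (Int × Int) → PySem.Set (Int × Int) → Int
  | 0, _, seen => (PySem.Set.len seen : Int)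
  | fuel + 1, stack, seen =>
    match stack with
    | [] => (PySem.Set.len seen : Int)
    | (x, y) :: stack' =>
      if PySem.Set.contains seen (x, y) then pvB_fill hm n_rows n_cols fuel stack' seen
      else if ¬(0 ≤ x ∧ x < n_cols ∧ 0 ≤ y ∧ y < n_rows) ∨ pvGrid hm y x = 9 then
        pvB_fill hm n_rows n_cols fuel stack' seen
      else
        pvB_fill hm n_rows n_cols fuel
          ((x, y - 1) :: (x, y + 1) :: (x - 1, y) :: (x + 1, y) :: stack')
          (PySem.Set.add seen (x, y))

def find_basin_size_list_alt (heightmap : List (List Int)) : List Int :=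
  let n_rows : Int := (heightmap.length : Int)
  let n_cols : Int := (heightmap.headI.length : Int)
  let lows : List (Int × Int) :=
    (PySem.List.enumerate heightmap).foldl (fun acc ir =>
      (PySem.List.enumerate ir.2).foldl (fun acc2 jp =>
        let low := decide
          ((ir.1 - 1 < 0 ∨ pvGrid heightmap (ir.1 - 1) jp.1 > jp.2)
           ∧ (jp.1 + 1 ≥ n_cols ∨ pvGrid heightmap ir.1 (jp.1 + 1) > jp.2)
           ∧ (ir.1 + 1 ≥ n_rows ∨ pvGrid heightmap (ir.1 + 1) jp.1 > jp.2)
           ∧ (jp.1 - 1 < 0 ∨ pvGrid heightmap ir.1 (jp.1 - 1) > jp.2))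
        if low then acc2 ++ [(jp.1, ir.1)] else acc2) acc) []
  lows.foldl (fun acc p =>
    acc ++ [pvB_fill heightmap n_rows n_cols
      (1 + 4 * (heightmap.length * heightmap.headI.length)) [(p.1, p.2)] PySem.Set.empty]) []

-- ===== PRECONDITION & SPEC =====
-- Pre_: non-empty rectangular heightmaps — exactly the inputs where Python A returns; on an
-- empty heightmap or one with rows of differing lengths A raises IndexError.
def Pre_find_basin_size_list (heightmap : List (List Int)) : Prop :=
  heightmap ≠ [] ∧ ∀ row ∈ heightmap, row.length = heightmap.headI.length
instance (heightmap : List (List Int)) : Decidable (Pre_find_basin_size_list heightmap) := by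
  unfold Pre_find_basin_size_list; infer_instance

def pvWitness_find_basin_size_list : List (List Int) := [[1, 2], [9, 4]]

-- On heightmaps where some cell of height ≥ -1 has an in-bounds neighbour equal to -1 and
-- all its other in-bounds neighbours are higher, A conflates that -1 height with its
-- out-of-bounds sentinel and reports the cell as an extra low point (an extra basin size in
-- the returned list); B returns only the true low points' basin sizes, the intended value
-- since a cell is not lower than a -1 neighbour.
def pvRow (hm : List (List Int)) (y : Nat) : List Int := hm.getD y []

-- the heights of the in-bounds neighbours of cell (row y, column x)
def pvNbrVals (hm : List (List Int)) (y x : Nat) : List Int :=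
  (if 1 ≤ y then [(pvRow hm (y - 1)).getD x 0] else [])
    ++ (if x + 1 < (pvRow hm y).length then [(pvRow hm y).getD (x + 1) 0] else [])
    ++ (if y + 1 < hm.length then [(pvRow hm (y + 1)).getD x 0] else [])
    ++ (if 1 ≤ x then [(pvRow hm y).getD (x - 1) 0] else [])

def D_find_basin_size_list (heightmap : List (List Int)) : Prop :=
  ∃ y ∈ List.range heightmap.length, ∃ x ∈ List.range (pvRow heightmap y).length,
    -1 ≤ (pvRow heightmap y).getD x 0
    ∧ (∀ v ∈ pvNbrVals heightmap y x, v = -1 ∨ (pvRow heightmap y).getD x 0 < v)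
    ∧ -1 ∈ pvNbrVals heightmap y x
instance (heightmap : List (List Int)) : Decidable (D_find_basin_size_list heightmap) := by
  unfold D_find_basin_size_list; infer_instance

def Spec_find_basin_size_list (heightmap : List (List Int)) (out : List Int) : Prop :=
  ¬ D_find_basin_size_list heightmap → out = find_basin_size_list_alt heightmap
instance (heightmap : List (List Int)) (out : List Int) :
    Decidable (Spec_find_basin_size_list heightmap out) := by
  unfold Spec_find_basin_size_list; infer_instance

def pvDiffWitness_find_basin_size_list : List (List Int) := [[0, -1]]
def pvDiffWitnessOut_find_basin_size_list : (List Int) × (List Int) := ([2, 2], [2])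

-- ===== CLAIM (what is proved, stated in full; the proofs are below) =====
def Claim_unchanged_find_basin_size_list : Prop :=
  ∀ (heightmap : List (List Int)), Dom_find_basin_size_list heightmap →
    Pre_find_basin_size_list heightmap →
    Spec_find_basin_size_list heightmap (find_basin_size_list heightmap)

def Claim_changed_find_basin_size_list : Prop :=
  Dom_find_basin_size_list (pvDiffWitness_find_basin_size_list)
  ∧ Pre_find_basin_size_list (pvDiffWitness_find_basin_size_list)
  ∧ D_find_basin_size_list (pvDiffWitness_find_basin_size_list)
  ∧ find_basin_size_list (pvDiffWitness_find_basin_size_list) = pvDiffWitnessOut_find_basin_size_list.1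
  ∧ find_basin_size_list_alt (pvDiffWitness_find_basin_size_list) = pvDiffWitnessOut_find_basin_size_list.2
  ∧ pvDiffWitnessOut_find_basin_size_list.1 ≠ pvDiffWitnessOut_find_basin_size_list.2

def Claim_exact_find_basin_size_list : Prop :=
  ∀ (heightmap : List (List Int)), Dom_find_basin_size_list heightmap →
    Pre_find_basin_size_list heightmap → D_find_basin_size_list heightmap →
    find_basin_size_list heightmap ≠ find_basin_size_list_alt heightmap

-- ===== LEMMAS AND PROOFS =====

-- the cell condition on which A's and B's low-point tests disagree, in the ports' terms
def pvDCell (hm : List (List Int)) (x y h : Int) : Prop :=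
  -1 ≤ h
  ∧ (y - 1 < 0 ∨ pvGrid hm (y - 1) x = -1 ∨ pvGrid hm (y - 1) x > h)
  ∧ (x + 1 ≥ (hm.headI.length : Int) ∨ pvGrid hm y (x + 1) = -1 ∨ pvGrid hm y (x + 1) > h)
  ∧ (y + 1 ≥ (hm.length : Int) ∨ pvGrid hm (y + 1) x = -1 ∨ pvGrid hm (y + 1) x > h)
  ∧ (x - 1 < 0 ∨ pvGrid hm y (x - 1) = -1 ∨ pvGrid hm y (x - 1) > h)
  ∧ ((0 ≤ y - 1 ∧ pvGrid hm (y - 1) x = -1)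
     ∨ (x + 1 < (hm.headI.length : Int) ∧ pvGrid hm y (x + 1) = -1)
     ∨ (y + 1 < (hm.length : Int) ∧ pvGrid hm (y + 1) x = -1)
     ∨ (0 ≤ x - 1 ∧ pvGrid hm y (x - 1) = -1))

theorem pv_grid_natCast (hm : List (List Int)) (a b : Nat) :
    pvGrid hm (a : Int) (b : Int) = (pvRow hm a).getD b 0 := by
  simp [pvGrid, pvRow, PySem.List.pyGet?_natCast, List.getD_eq_getElem?_getD]

theorem nbr_mem_iff (hm : List (List Int)) (y x : Nat) (v : Int) :
    v ∈ pvNbrVals hm y x ↔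
      ((1 ≤ y ∧ v = (pvRow hm (y - 1)).getD x 0)
       ∨ (x + 1 < (pvRow hm y).length ∧ v = (pvRow hm y).getD (x + 1) 0)
       ∨ (y + 1 < hm.length ∧ v = (pvRow hm (y + 1)).getD x 0)
       ∨ (1 ≤ x ∧ v = (pvRow hm y).getD (x - 1) 0)) := by
  unfold pvNbrVals
  split_ifs <;>
    simp only [List.mem_append, List.mem_cons, List.not_mem_nil, or_false, false_or] <;>
    tauto

theorem pv_row_mem (hm : List (List Int)) (y : Nat) (hy : y < hm.length) : pvRow hm y ∈ hm := by
  simp [pvRow, List.getD_eq_getElem?_getD, List.getElem?_eq_getElem hy]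

theorem pv_row_eq (hm : List (List Int)) (k : Nat) (hk : k < hm.length) :
    pvRow hm k = hm[k] := by
  simp [pvRow, List.getD_eq_getElem?_getD, List.getElem?_eq_getElem hk]

-- the ports' cell condition coincides with D_'s neighbour-list reading of the input
theorem pv_dcell_iff (hm : List (List Int))
    (hpre : ∀ row ∈ hm, row.length = hm.headI.length)
    (y x : Nat) (hy : y < hm.length) (hx : x < (pvRow hm y).length) :
    pvDCell hm (x : Int) (y : Int) ((pvRow hm y).getD x 0) ↔
      (-1 ≤ (pvRow hm y).getD x 0
       ∧ (∀ v ∈ pvNbrVals hm y x, v = -1 ∨ (pvRow hm y).getD x 0 < v)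
       ∧ -1 ∈ pvNbrVals hm y x) := by
  have hC : (pvRow hm y).length = hm.headI.length := hpre _ (pv_row_mem hm y hy)
  have he1 : 1 ≤ y → pvGrid hm ((y : Int) - 1) (x : Int) = (pvRow hm (y - 1)).getD x 0 := by
    intro g
    rw [show ((y : Int) - 1) = ((y - 1 : Nat) : Int) by omega, pv_grid_natCast]
  have he2 : pvGrid hm (y : Int) ((x : Int) + 1) = (pvRow hm y).getD (x + 1) 0 := by
    rw [show ((x : Int) + 1) = ((x + 1 : Nat) : Int) by push_cast; ring, pv_grid_natCast]
  have he3 : pvGrid hm ((y : Int) + 1) (x : Int) = (pvRow hm (y + 1)).getD x 0 := by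
    rw [show ((y : Int) + 1) = ((y + 1 : Nat) : Int) by push_cast; ring, pv_grid_natCast]
  have he4 : 1 ≤ x → pvGrid hm (y : Int) ((x : Int) - 1) = (pvRow hm y).getD (x - 1) 0 := by
    intro g
    rw [show ((x : Int) - 1) = ((x - 1 : Nat) : Int) by omega, pv_grid_natCast]
  unfold pvDCell
  constructor
  · rintro ⟨hh, c1, c2, c3, c4, cw⟩
    refine ⟨hh, ?_, ?_⟩
    · intro v hv
      rw [nbr_mem_iff] at hv
      rcases hv with ⟨g, rfl⟩ | ⟨g, rfl⟩ | ⟨g, rfl⟩ | ⟨g, rfl⟩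
      · rcases c1 with hc | hc | hc
        · omega
        · exact Or.inl ((he1 g) ▸ hc)
        · exact Or.inr ((he1 g) ▸ hc)
      · rcases c2 with hc | hc | hc
        · omega
        · exact Or.inl (he2 ▸ hc)
        · exact Or.inr (he2 ▸ hc)
      · rcases c3 with hc | hc | hc
        · omega
        · exact Or.inl (he3 ▸ hc)
        · exact Or.inr (he3 ▸ hc)
      · rcases c4 with hc | hc | hc
        · omega
        · exact Or.inl ((he4 g) ▸ hc)
        · exact Or.inr ((he4 g) ▸ hc)
    · rw [nbr_mem_iff]
      rcases cw with ⟨gb, gv⟩ | ⟨gb, gv⟩ | ⟨gb, gv⟩ | ⟨gb, gv⟩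
      · exact Or.inl ⟨by omega, ((he1 (by omega)) ▸ gv).symm⟩
      · exact Or.inr (Or.inl ⟨by omega, (he2 ▸ gv).symm⟩)
      · exact Or.inr (Or.inr (Or.inl ⟨by omega, (he3 ▸ gv).symm⟩))
      · exact Or.inr (Or.inr (Or.inr ⟨by omega, ((he4 (by omega)) ▸ gv).symm⟩))
  · rintro ⟨hh, hall, hmem⟩
    refine ⟨hh, ?_, ?_, ?_, ?_, ?_⟩
    · by_cases g : 1 ≤ y
      · rcases hall _ ((nbr_mem_iff hm y x _).mpr (Or.inl ⟨g, rfl⟩)) with h' | h'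
        · exact Or.inr (Or.inl ((he1 g).symm ▸ h'))
        · exact Or.inr (Or.inr (by rw [he1 g]; exact h'))
      · exact Or.inl (by omega)
    · by_cases g : x + 1 < (pvRow hm y).length
      · rcases hall _ ((nbr_mem_iff hm y x _).mpr (Or.inr (Or.inl ⟨g, rfl⟩))) with h' | h'
        · exact Or.inr (Or.inl (by rw [he2]; exact h'))
        · exact Or.inr (Or.inr (by rw [he2]; exact h'))
      · exact Or.inl (by omega)
    · by_cases g : y + 1 < hm.length
      · rcases hall _ ((nbr_mem_iff hm y x _).mpr (Or.inr (Or.inr (Or.inl ⟨g, rfl⟩)))) with h' | h'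
        · exact Or.inr (Or.inl (by rw [he3]; exact h'))
        · exact Or.inr (Or.inr (by rw [he3]; exact h'))
      · exact Or.inl (by omega)
    · by_cases g : 1 ≤ x
      · rcases hall _ ((nbr_mem_iff hm y x _).mpr (Or.inr (Or.inr (Or.inr ⟨g, rfl⟩)))) with h' | h'
        · exact Or.inr (Or.inl (by rw [he4 g]; exact h'))
        · exact Or.inr (Or.inr (by rw [he4 g]; exact h'))
      · exact Or.inl (by omega)
    · rw [nbr_mem_iff] at hmem
      rcases hmem with ⟨g, gv⟩ | ⟨g, gv⟩ | ⟨g, gv⟩ | ⟨g, gv⟩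
      · exact Or.inl ⟨by omega, by rw [he1 g]; exact gv.symm⟩
      · exact Or.inr (Or.inl ⟨by omega, by rw [he2]; exact gv.symm⟩)
      · exact Or.inr (Or.inr (Or.inl ⟨by omega, by rw [he3]; exact gv.symm⟩))
      · exact Or.inr (Or.inr (Or.inr ⟨by omega, by rw [he4 g]; exact gv.symm⟩))

theorem pv_dcell_to_D (hm : List (List Int))
    (hpre : ∀ row ∈ hm, row.length = hm.headI.length)
    {ir : Int × List Int} {jp : Int × Int}
    (hir : ir ∈ PySem.List.enumerate hm) (hjp : jp ∈ PySem.List.enumerate ir.2)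
    (hc : pvDCell hm jp.1 ir.1 jp.2) : D_find_basin_size_list hm := by
  obtain ⟨k, hk, hpk⟩ := (PySem.List.mem_enumerate_iff _ _ _).1 hir
  rw [hpk] at hjp hc
  obtain ⟨j, hj, hqj⟩ := (PySem.List.mem_enumerate_iff _ _ _).1 hjp
  rw [hqj] at hc
  simp only [zero_add] at hc
  have hrow : pvRow hm k = hm[k] := pv_row_eq hm k hk
  have hval : (pvRow hm k).getD j 0 = hm[k][j] := by
    rw [hrow]; simp [List.getD_eq_getElem?_getD, List.getElem?_eq_getElem hj]
  have hj' : j < (pvRow hm k).length := by rw [hrow]; exact hj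
  refine ⟨k, List.mem_range.2 hk, j, List.mem_range.2 hj', ?_⟩
  apply (pv_dcell_iff hm hpre k j hk hj').1
  rw [hval]
  exact hc

theorem pv_D_to_dcell (hm : List (List Int))
    (hpre : ∀ row ∈ hm, row.length = hm.headI.length) (hd : D_find_basin_size_list hm) :
    ∃ p ∈ PySem.List.enumerate hm, ∃ q ∈ PySem.List.enumerate p.2,
      pvDCell hm q.1 p.1 q.2 := by
  obtain ⟨y, hy, x, hx, hbody⟩ := hd
  rw [List.mem_range] at hy hx
  have hrow : pvRow hm y = hm[y] := pv_row_eq hm y hy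
  refine ⟨((y : Int), pvRow hm y), ?_, ((x : Int), (pvRow hm y).getD x 0), ?_, ?_⟩
  · exact (PySem.List.mem_enumerate_iff _ _ _).2 ⟨y, hy, by rw [hrow]; simp⟩
  · refine (PySem.List.mem_enumerate_iff _ _ _).2 ⟨x, hx, ?_⟩
    simp [List.getD_eq_getElem?_getD, List.getElem?_eq_getElem hx]
  · exact (pv_dcell_iff hm hpre y x hy hx).2 hbody

-- a cell the flood fill may visit: in bounds and height ≠ 9
def pvOk (hm : List (List Int)) (n_rows n_cols : Int) (p : Int × Int) : Prop :=
  0 ≤ p.1 ∧ p.1 < n_cols ∧ 0 ≤ p.2 ∧ p.2 < n_rows ∧ pvGrid hm p.2 p.1 ≠ 9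

def pvNbrs (p : Int × Int) : List (Int × Int) :=
  [(p.1 + 1, p.2), (p.1 - 1, p.2), (p.1, p.2 + 1), (p.1, p.2 - 1)]

def pvAdj (hm : List (List Int)) (R C : Int) (p q : Int × Int) : Prop :=
  pvOk hm R C p ∧ pvOk hm R C q ∧ q ∈ pvNbrs p

def pvReach (hm : List (List Int)) (R C : Int) (s q : Int × Int) : Prop :=
  pvOk hm R C s ∧ Relation.ReflTransGen (pvAdj hm R C) s q

theorem pvReach_ok {hm : List (List Int)} {R C : Int} {s q : Int × Int}
    (h : pvReach hm R C s q) : pvOk hm R C q := by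
  obtain ⟨hs, hr⟩ := h
  rcases hr.cases_tail with h | ⟨c, _, hadj⟩
  · exact h ▸ hs
  · exact hadj.2.1

theorem pvReach_step {hm : List (List Int)} {R C : Int} {s p q : Int × Int}
    (h : pvReach hm R C s p) (hq : pvOk hm R C q) (hmem : q ∈ pvNbrs p) :
    pvReach hm R C s q :=
  ⟨h.1, h.2.tail ⟨pvReach_ok h, hq, hmem⟩⟩

-- a closed visited set containing the start absorbs everything reachable
theorem pv_complete {hm : List (List Int)} {R C : Int} {start : Int × Int}
    {V : List (Int × Int)}
    (hstart : pvOk hm R C start → start ∈ V)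
    (hclosed : ∀ v ∈ V, ∀ n ∈ pvNbrs v, pvOk hm R C n → n ∈ V) :
    ∀ q, pvReach hm R C start q → q ∈ V := by
  rintro q ⟨hs, hr⟩
  induction hr with
  | refl => exact hstart hs
  | tail _ h2 ih => exact hclosed _ ih _ h2.2.2 h2.2.1

-- cardinality bound: a nodup list of ok cells has at most n_rows*n_cols elements
def pvAllPos (Rn Cn : Nat) : List (Int × Int) :=
  (List.range Cn).flatMap (fun x => (List.range Rn).map (fun y => (Int.ofNat x, Int.ofNat y)))

theorem pv_hcard (hm : List (List Int)) :
    ∀ V : List (Int × Int), V.Nodup →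
      (∀ p ∈ V, pvOk hm (hm.length : Int) (hm.headI.length : Int) p) →
      V.length ≤ hm.length * hm.headI.length := by
  intro V hnd hok
  have hsub : ∀ p ∈ V, p ∈ pvAllPos hm.length hm.headI.length := by
    intro p hp
    obtain ⟨h1, h2, h3, h4, -⟩ := hok p hp
    have hx : p.1.toNat ∈ List.range hm.headI.length := List.mem_range.2 (by omega)
    have hy : p.2.toNat ∈ List.range hm.length := List.mem_range.2 (by omega)
    exact List.mem_flatMap.2 ⟨p.1.toNat, hx, List.mem_map.2 ⟨p.2.toNat, hy,
      by simp [Int.toNat_of_nonneg h1, Int.toNat_of_nonneg h3]⟩⟩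
  have hlen : (pvAllPos hm.length hm.headI.length).length = hm.headI.length * hm.length := by
    simp [pvAllPos, List.length_flatMap]
  calc V.length = V.toFinset.card := (List.toFinset_card_of_nodup hnd).symm
    _ ≤ (pvAllPos hm.length hm.headI.length).toFinset.card :=
        Finset.card_le_card (fun a ha => by
          simp only [List.mem_toFinset] at ha ⊢; exact hsub a ha)
    _ ≤ (pvAllPos hm.length hm.headI.length).length := List.toFinset_card_le _
    _ = hm.headI.length * hm.length := hlen
    _ = hm.length * hm.headI.length := Nat.mul_comm ..

-- A's worklist recursion computes (the length of) a nodup enumeration of the reachable set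
theorem pvA_fill_spec (hm : List (List Int)) (R C : Int) (N : Nat) (start : Int × Int)
    (hcard : ∀ V : List (Int × Int), V.Nodup → (∀ p ∈ V, pvOk hm R C p) → V.length ≤ N) :
    ∀ (fuel : Nat) (pending visited : List (Int × Int)),
      visited.Nodup →
      (∀ p ∈ pending, p ∉ visited) →
      (∀ v ∈ visited, pvReach hm R C start v) →
      (∀ p ∈ pending, pvOk hm R C p → pvReach hm R C start p) →
      (∀ v ∈ visited, ∀ n ∈ pvNbrs v, pvOk hm R C n → n ∈ visited ∨ n ∈ pending) →
      (pvOk hm R C start → start ∈ visited ∨ start ∈ pending) →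
      pending.length + 4 * (N - visited.length) ≤ fuel →
      ∃ V : List (Int × Int), pvA_determine_basin_size hm R C fuel pending visited = (V.length : Int)
        ∧ V.Nodup ∧ (∀ q, q ∈ V ↔ pvReach hm R C start q) := by
  intro fuel
  induction fuel with
  | zero =>
    intro pending visited hnd _hdisj hvr _hpr hclosed hstart hfuel
    have hpend : pending = [] := by
      cases pending with
      | nil => rfl
      | cons p rest => simp at hfuel
    subst hpend
    refine ⟨visited, rfl, hnd, fun q => ⟨fun hq => hvr q hq, fun hq =>
      pv_complete (fun hs => (hstart hs).resolve_right (by simp))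
        (fun v hv n hn hok => (hclosed v hv n hn hok).resolve_right (by simp)) q hq⟩⟩
  | succ f ih =>
    intro pending visited hnd hdisj hvr hpr hclosed hstart hfuel
    match pending with
    | [] =>
      refine ⟨visited, rfl, hnd, fun q => ⟨fun hq => hvr q hq, fun hq =>
        pv_complete (fun hs => (hstart hs).resolve_right (by simp))
          (fun v hv n hn hok => (hclosed v hv n hn hok).resolve_right (by simp)) q hq⟩⟩
    | (x, y) :: rest =>
      by_cases h : 0 ≤ x ∧ x < C ∧ 0 ≤ y ∧ y < R ∧ pvGrid hm y x ≠ 9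
      · have hok : pvOk hm R C (x, y) := h
        have hxy_nv : (x, y) ∉ visited := hdisj _ List.mem_cons_self
        have hxy_reach : pvReach hm R C start (x, y) := hpr _ List.mem_cons_self hok
        have hstep : pvA_determine_basin_size hm R C (f + 1) ((x, y) :: rest) visited =
            pvA_determine_basin_size hm R C f
              ((rest ++ [(x + 1, y), (x - 1, y), (x, y + 1), (x, y - 1)]).filter
                (fun p => decide (p ∉ visited ++ [(x, y)])))
              (visited ++ [(x, y)]) := by
          simp only [pvA_determine_basin_size, if_pos h]
        rw [hstep]
        set V' := visited ++ [(x, y)] with hV'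
        set P' := (rest ++ [(x + 1, y), (x - 1, y), (x, y + 1), (x, y - 1)]).filter
          (fun p => decide (p ∉ V')) with hP'
        have hmemV' : ∀ q, q ∈ V' ↔ q ∈ visited ∨ q = (x, y) := by
          intro q; simp [hV']
        have hmemP' : ∀ p, p ∈ P' ↔ (p ∈ rest ∨ p ∈ pvNbrs (x, y)) ∧ p ∉ V' := by
          intro p; simp [hP', pvNbrs, List.mem_filter]; tauto
        have hnbrs : pvNbrs (x, y) = [(x + 1, y), (x - 1, y), (x, y + 1), (x, y - 1)] := rfl
        have hnd' : V'.Nodup := by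
          rw [hV', List.nodup_append]
          refine ⟨hnd, by simp, ?_⟩
          intro a ha b hb
          rw [List.mem_singleton] at hb
          subst hb
          intro hEq
          exact hxy_nv (hEq ▸ ha)
        have hvr' : ∀ v ∈ V', pvReach hm R C start v := by
          intro v hv
          rcases (hmemV' v).1 hv with hv | hv
          · exact hvr v hv
          · exact hv ▸ hxy_reach
        apply ih P' V' hnd'
        · intro p hp
          exact ((hmemP' p).1 hp).2
        · exact hvr'
        · intro p hp hokp
          rcases ((hmemP' p).1 hp).1 with hp' | hp'
          · exact hpr p (List.mem_cons_of_mem _ hp') hokp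
          · exact pvReach_step hxy_reach hokp hp'
        · intro v hv n hn hokn
          by_cases hnv : n ∈ V'
          · exact Or.inl hnv
          · refine Or.inr ((hmemP' n).2 ⟨?_, hnv⟩)
            rcases (hmemV' v).1 hv with hv' | hv'
            · rcases hclosed v hv' n hn hokn with h1 | h1
              · exact absurd ((hmemV' n).2 (Or.inl h1)) hnv
              · rcases List.mem_cons.1 h1 with h2 | h2
                · exact absurd ((hmemV' n).2 (Or.inr h2)) hnv
                · exact Or.inl h2
            · exact Or.inr (hv' ▸ hn)
        · intro hs
          rcases hstart hs with h1 | h1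
          · exact Or.inl ((hmemV' start).2 (Or.inl h1))
          · rcases List.mem_cons.1 h1 with h2 | h2
            · exact Or.inl ((hmemV' start).2 (Or.inr h2))
            · by_cases hsv : start ∈ V'
              · exact Or.inl hsv
              · exact Or.inr ((hmemP' start).2 ⟨Or.inl h2, hsv⟩)
        · have hlenP' : P'.length ≤ rest.length + 4 := by
            calc P'.length ≤ (rest ++ [(x + 1, y), (x - 1, y), (x, y + 1), (x, y - 1)]).length :=
                List.length_filter_le _ _
              _ = rest.length + 4 := by simp
          have hlenV' : V'.length = visited.length + 1 := by simp [hV']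
          have hboundV' : V'.length ≤ N := by
            apply hcard V' hnd'
            intro p hp
            exact pvReach_ok (hvr' p hp)
          simp only [List.length_cons] at hfuel
          omega
      · have hstep : pvA_determine_basin_size hm R C (f + 1) ((x, y) :: rest) visited =
            pvA_determine_basin_size hm R C f
              (rest.filter (fun p => decide (p ∉ visited))) visited := by
          simp only [pvA_determine_basin_size, if_neg h]
        rw [hstep]
        apply ih _ _ hnd
        · intro p hp
          simp only [List.mem_filter, decide_eq_true_eq] at hp
          exact hp.2
        · exact hvr
        · intro p hp hokp
          simp only [List.mem_filter, decide_eq_true_eq] at hp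
          exact hpr p (List.mem_cons_of_mem _ hp.1) hokp
        · intro v hv n hn hokn
          rcases hclosed v hv n hn hokn with h1 | h1
          · exact Or.inl h1
          · rcases List.mem_cons.1 h1 with h2 | h2
            · exact absurd (show pvOk hm R C (x, y) by rw [← h2]; exact hokn) h
            · by_cases hnv : n ∈ visited
              · exact Or.inl hnv
              · exact Or.inr (List.mem_filter.2 ⟨h2, by simpa using hnv⟩)
        · intro hs
          rcases hstart hs with h1 | h1
          · exact Or.inl h1
          · rcases List.mem_cons.1 h1 with h2 | h2
            · exact absurd (show pvOk hm R C (x, y) by rw [← h2]; exact hs) h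
            · by_cases hsv : start ∈ visited
              · exact Or.inl hsv
              · exact Or.inr (List.mem_filter.2 ⟨h2, by simpa using hsv⟩)
        · have : (rest.filter (fun p => decide (p ∉ visited))).length ≤ rest.length :=
            List.length_filter_le _ _
          simp only [List.length_cons] at hfuel
          omega

-- B's DFS loop computes (the length of) a nodup enumeration of the reachable set
theorem pvB_fill_spec (hm : List (List Int)) (R C : Int) (N : Nat) (start : Int × Int)
    (hcard : ∀ V : List (Int × Int), V.Nodup → (∀ p ∈ V, pvOk hm R C p) → V.length ≤ N) :
    ∀ (fuel : Nat) (stack seen : List (Int × Int)),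
      seen.Nodup →
      (∀ v ∈ seen, pvReach hm R C start v) →
      (∀ p ∈ stack, pvOk hm R C p → pvReach hm R C start p) →
      (∀ v ∈ seen, ∀ n ∈ pvNbrs v, pvOk hm R C n → n ∈ seen ∨ n ∈ stack) →
      (pvOk hm R C start → start ∈ seen ∨ start ∈ stack) →
      stack.length + 4 * (N - seen.length) ≤ fuel →
      ∃ V : List (Int × Int), pvB_fill hm R C fuel stack seen = (V.length : Int)
        ∧ V.Nodup ∧ (∀ q, q ∈ V ↔ pvReach hm R C start q) := by
  intro fuel
  induction fuel with
  | zero =>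
    intro stack seen hnd hvr _hpr hclosed hstart hfuel
    have hpend : stack = [] := by
      cases stack with
      | nil => rfl
      | cons p rest => simp at hfuel
    subst hpend
    refine ⟨seen, rfl, hnd, fun q => ⟨fun hq => hvr q hq, fun hq =>
      pv_complete (fun hs => (hstart hs).resolve_right (by simp))
        (fun v hv n hn hok => (hclosed v hv n hn hok).resolve_right (by simp)) q hq⟩⟩
  | succ f ih =>
    intro stack seen hnd hvr hpr hclosed hstart hfuel
    match stack with
    | [] =>
      refine ⟨seen, rfl, hnd, fun q => ⟨fun hq => hvr q hq, fun hq =>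
        pv_complete (fun hs => (hstart hs).resolve_right (by simp))
          (fun v hv n hn hok => (hclosed v hv n hn hok).resolve_right (by simp)) q hq⟩⟩
    | (x, y) :: stack' =>
      have hcontains : PySem.Set.contains seen (x, y) = true ↔ (x, y) ∈ seen := by
        simp [PySem.Set.contains]
      by_cases hmem : (x, y) ∈ seen
      · have hstep : pvB_fill hm R C (f + 1) ((x, y) :: stack') seen =
            pvB_fill hm R C f stack' seen := by
          simp only [pvB_fill, if_pos (hcontains.2 hmem)]
        rw [hstep]
        apply ih stack' seen hnd hvr
        · exact fun p hp => hpr p (List.mem_cons_of_mem _ hp)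
        · intro v hv n hn hokn
          rcases hclosed v hv n hn hokn with h1 | h1
          · exact Or.inl h1
          · rcases List.mem_cons.1 h1 with h2 | h2
            · exact Or.inl (h2 ▸ hmem)
            · exact Or.inr h2
        · intro hs
          rcases hstart hs with h1 | h1
          · exact Or.inl h1
          · rcases List.mem_cons.1 h1 with h2 | h2
            · exact Or.inl (h2 ▸ hmem)
            · exact Or.inr h2
        · simp only [List.length_cons] at hfuel
          omega
      · by_cases h : 0 ≤ x ∧ x < C ∧ 0 ≤ y ∧ y < R ∧ pvGrid hm y x ≠ 9
        · have hok : pvOk hm R C (x, y) := h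
          have hnot9 : ¬(¬(0 ≤ x ∧ x < C ∧ 0 ≤ y ∧ y < R) ∨ pvGrid hm y x = 9) := by
            rintro (h1 | h1)
            · exact h1 ⟨h.1, h.2.1, h.2.2.1, h.2.2.2.1⟩
            · exact h.2.2.2.2 h1
          have hadd : PySem.Set.add seen (x, y) = seen ++ [(x, y)] := by
            simp [PySem.Set.add, PySem.Set.contains, hmem]
          have hstep : pvB_fill hm R C (f + 1) ((x, y) :: stack') seen =
              pvB_fill hm R C f
                ((x, y - 1) :: (x, y + 1) :: (x - 1, y) :: (x + 1, y) :: stack')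
                (seen ++ [(x, y)]) := by
            rw [← hadd]
            simp only [pvB_fill]
            rw [if_neg (by simp [PySem.Set.contains, hmem]), if_neg hnot9]
          rw [hstep]
          have hxy_reach : pvReach hm R C start (x, y) := hpr _ List.mem_cons_self hok
          set V' := seen ++ [(x, y)] with hV'
          have hmemV' : ∀ q, q ∈ V' ↔ q ∈ seen ∨ q = (x, y) := by intro q; simp [hV']
          have hnd' : V'.Nodup := by
            rw [hV', List.nodup_append]
            refine ⟨hnd, by simp, ?_⟩
            intro a ha b hb
            rw [List.mem_singleton] at hb
            subst hb
            intro hEq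
            exact hmem (hEq ▸ ha)
          have hvr' : ∀ v ∈ V', pvReach hm R C start v := by
            intro v hv
            rcases (hmemV' v).1 hv with hv | hv
            · exact hvr v hv
            · exact hv ▸ hxy_reach
          apply ih _ _ hnd' hvr'
          · intro p hp hokp
            rcases List.mem_cons.1 hp with h1 | hp
            · exact pvReach_step hxy_reach hokp (by rw [h1]; simp [pvNbrs])
            · rcases List.mem_cons.1 hp with h1 | hp
              · exact pvReach_step hxy_reach hokp (by rw [h1]; simp [pvNbrs])
              · rcases List.mem_cons.1 hp with h1 | hp
                · exact pvReach_step hxy_reach hokp (by rw [h1]; simp [pvNbrs])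
                · rcases List.mem_cons.1 hp with h1 | hp
                  · exact pvReach_step hxy_reach hokp (by rw [h1]; simp [pvNbrs])
                  · exact hpr p (List.mem_cons_of_mem _ hp) hokp
          · intro v hv n hn hokn
            rcases (hmemV' v).1 hv with hv' | hv'
            · rcases hclosed v hv' n hn hokn with h1 | h1
              · exact Or.inl ((hmemV' n).2 (Or.inl h1))
              · rcases List.mem_cons.1 h1 with h2 | h2
                · exact Or.inl ((hmemV' n).2 (Or.inr h2))
                · exact Or.inr (by simp [h2])
            · subst hv'
              simp only [pvNbrs, List.mem_cons, List.not_mem_nil, or_false] at hn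
              rcases hn with h2 | h2 | h2 | h2 <;> exact Or.inr (by simp [h2])
          · intro hs
            rcases hstart hs with h1 | h1
            · exact Or.inl ((hmemV' start).2 (Or.inl h1))
            · rcases List.mem_cons.1 h1 with h2 | h2
              · exact Or.inl ((hmemV' start).2 (Or.inr h2))
              · exact Or.inr (by simp [h2])
          · have hboundV' : V'.length ≤ N := by
              apply hcard V' hnd'
              intro p hp
              exact pvReach_ok (hvr' p hp)
            have hlenV' : V'.length = seen.length + 1 := by simp [hV']
            simp only [List.length_cons] at hfuel ⊢
            omega
        · have hstep : pvB_fill hm R C (f + 1) ((x, y) :: stack') seen =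
              pvB_fill hm R C f stack' seen := by
            simp only [pvB_fill]
            rw [if_neg (by simp [PySem.Set.contains, hmem]), if_pos (by tauto)]
          rw [hstep]
          apply ih stack' seen hnd hvr
          · exact fun p hp => hpr p (List.mem_cons_of_mem _ hp)
          · intro v hv n hn hokn
            rcases hclosed v hv n hn hokn with h1 | h1
            · exact Or.inl h1
            · rcases List.mem_cons.1 h1 with h2 | h2
              · exact absurd (show pvOk hm R C (x, y) by rw [← h2]; exact hokn) h
              · exact Or.inr h2
          · intro hs
            rcases hstart hs with h1 | h1
            · exact Or.inl h1
            · rcases List.mem_cons.1 h1 with h2 | h2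
              · exact absurd (show pvOk hm R C (x, y) by rw [← h2]; exact hs) h
              · exact Or.inr h2
          · simp only [List.length_cons] at hfuel
            omega

-- the two flood fills agree from any start, with the fuel the ports supply
theorem pv_fill_eq (hm : List (List Int)) (p : Int × Int) :
    pvA_determine_basin_size hm (hm.length : Int) (hm.headI.length : Int)
      (1 + 4 * (hm.length * hm.headI.length)) [(p.1, p.2)] []
    = pvB_fill hm (hm.length : Int) (hm.headI.length : Int)
      (1 + 4 * (hm.length * hm.headI.length)) [(p.1, p.2)] PySem.Set.empty := by
  obtain ⟨VA, hA, hAnd, hAm⟩ := pvA_fill_spec hm _ _ (hm.length * hm.headI.length) (p.1, p.2)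
    (pv_hcard hm) (1 + 4 * (hm.length * hm.headI.length)) [(p.1, p.2)] []
    (by simp) (by simp) (by simp) (by intro q hq hok; simp at hq; exact ⟨hq ▸ hok, hq ▸ Relation.ReflTransGen.refl⟩)
    (by simp) (fun h => Or.inr (by simp)) (by simp)
  obtain ⟨VB, hB, hBnd, hBm⟩ := pvB_fill_spec hm _ _ (hm.length * hm.headI.length) (p.1, p.2)
    (pv_hcard hm) (1 + 4 * (hm.length * hm.headI.length)) [(p.1, p.2)] PySem.Set.empty
    (by simp [PySem.Set.empty]) (by simp [PySem.Set.empty])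
    (by intro q hq hok; simp at hq; exact ⟨hq ▸ hok, hq ▸ Relation.ReflTransGen.refl⟩)
    (by simp [PySem.Set.empty]) (fun h => Or.inr (by simp)) (by simp [PySem.Set.empty])
  rw [hA, hB]
  have := List.Perm.length_eq ((List.perm_ext_iff_of_nodup hAnd hBnd).2
    (fun a => (hAm a).trans (hBm a).symm))
  exact_mod_cast this

-- all(n > h) over the ≠ -1 filtered four-element list, as one decided conjunction
theorem pv_all_filter (a b c d h : Int) :
    (([a, b, c, d]).filter (fun n => decide (n ≠ -1))).all (fun n => decide (n > h))
    = decide ((a = -1 ∨ a > h) ∧ (b = -1 ∨ b > h) ∧ (c = -1 ∨ c > h) ∧ (d = -1 ∨ d > h)) := by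
  by_cases ha : a = -1 <;> by_cases hb : b = -1 <;> by_cases hc : c = -1 <;> by_cases hd : d = -1 <;>
    simp [ha, hb, hc, hd]

-- one direction of the low-point test: A's boundary sentinel vs the explicit bound check
theorem pv_dir (b : Prop) [Decidable b] (v h : Int) :
    ((if b then (-1 : Int) else v) = -1 ∨ (if b then (-1 : Int) else v) > h) ↔ (b ∨ v = -1 ∨ v > h) := by
  split_ifs with hb <;> simp [hb]

-- A's filtered-neighbour low-point test, as one decided four-way conjunction
theorem pv_cond_eq (hm : List (List Int)) (R C : Int) (jp : Int × Int) (i : Int) :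
    ((pvA_check_neighbors hm (jp.1, i) (R, C)).all (fun n => decide (n > jp.2)))
    = decide
        ((i - 1 < 0 ∨ pvGrid hm (i - 1) jp.1 = -1 ∨ pvGrid hm (i - 1) jp.1 > jp.2)
         ∧ (jp.1 + 1 ≥ C ∨ pvGrid hm i (jp.1 + 1) = -1 ∨ pvGrid hm i (jp.1 + 1) > jp.2)
         ∧ (i + 1 ≥ R ∨ pvGrid hm (i + 1) jp.1 = -1 ∨ pvGrid hm (i + 1) jp.1 > jp.2)
         ∧ (jp.1 - 1 < 0 ∨ pvGrid hm i (jp.1 - 1) = -1 ∨ pvGrid hm i (jp.1 - 1) > jp.2)) := by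
  show (([_, _, _, _]).filter (fun n => decide (n ≠ -1))).all (fun n => decide (n > jp.2)) = _
  rw [pv_all_filter, decide_eq_decide]
  exact and_congr (pv_dir _ _ _) (and_congr (pv_dir _ _ _) (and_congr (pv_dir _ _ _) (pv_dir _ _ _)))

-- B's strict test implies A's sentinel-tolerant test, clause by clause
theorem pv_B_imp_A (hm : List (List Int)) (x y h : Int)
    (hB : (y - 1 < 0 ∨ pvGrid hm (y - 1) x > h)
      ∧ (x + 1 ≥ (hm.headI.length : Int) ∨ pvGrid hm y (x + 1) > h)
      ∧ (y + 1 ≥ (hm.length : Int) ∨ pvGrid hm (y + 1) x > h)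
      ∧ (x - 1 < 0 ∨ pvGrid hm y (x - 1) > h)) :
    (y - 1 < 0 ∨ pvGrid hm (y - 1) x = -1 ∨ pvGrid hm (y - 1) x > h)
    ∧ (x + 1 ≥ (hm.headI.length : Int) ∨ pvGrid hm y (x + 1) = -1 ∨ pvGrid hm y (x + 1) > h)
    ∧ (y + 1 ≥ (hm.length : Int) ∨ pvGrid hm (y + 1) x = -1 ∨ pvGrid hm (y + 1) x > h)
    ∧ (x - 1 < 0 ∨ pvGrid hm y (x - 1) = -1 ∨ pvGrid hm y (x - 1) > h) := by
  tauto

-- where A's test holds and B's fails, the cell is exactly a D_-cell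
theorem pv_A_not_B (hm : List (List Int)) (x y h : Int)
    (hA : (y - 1 < 0 ∨ pvGrid hm (y - 1) x = -1 ∨ pvGrid hm (y - 1) x > h)
      ∧ (x + 1 ≥ (hm.headI.length : Int) ∨ pvGrid hm y (x + 1) = -1 ∨ pvGrid hm y (x + 1) > h)
      ∧ (y + 1 ≥ (hm.length : Int) ∨ pvGrid hm (y + 1) x = -1 ∨ pvGrid hm (y + 1) x > h)
      ∧ (x - 1 < 0 ∨ pvGrid hm y (x - 1) = -1 ∨ pvGrid hm y (x - 1) > h))
    (hB : ¬((y - 1 < 0 ∨ pvGrid hm (y - 1) x > h)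
      ∧ (x + 1 ≥ (hm.headI.length : Int) ∨ pvGrid hm y (x + 1) > h)
      ∧ (y + 1 ≥ (hm.length : Int) ∨ pvGrid hm (y + 1) x > h)
      ∧ (x - 1 < 0 ∨ pvGrid hm y (x - 1) > h))) :
    pvDCell hm x y h := by
  obtain ⟨a1, a2, a3, a4⟩ := hA
  unfold pvDCell
  by_cases b1 : y - 1 < 0 ∨ pvGrid hm (y - 1) x > h
  · by_cases b2 : x + 1 ≥ (hm.headI.length : Int) ∨ pvGrid hm y (x + 1) > h
    · by_cases b3 : y + 1 ≥ (hm.length : Int) ∨ pvGrid hm (y + 1) x > h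
      · by_cases b4 : x - 1 < 0 ∨ pvGrid hm y (x - 1) > h
        · exact absurd ⟨b1, b2, b3, b4⟩ hB
        · push Not at b4
          rcases a4 with h' | h' | h'
          · omega
          · exact ⟨by omega, a1, a2, a3, Or.inr (Or.inl h'),
              Or.inr (Or.inr (Or.inr ⟨by omega, h'⟩))⟩
          · omega
      · push Not at b3
        rcases a3 with h' | h' | h'
        · omega
        · exact ⟨by omega, a1, a2, Or.inr (Or.inl h'), a4,
            Or.inr (Or.inr (Or.inl ⟨by omega, h'⟩))⟩
        · omega
    · push Not at b2
      rcases a2 with h' | h' | h'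
      · omega
      · exact ⟨by omega, a1, Or.inr (Or.inl h'), a3, a4, Or.inr (Or.inl ⟨by omega, h'⟩)⟩
      · omega
  · push Not at b1
    rcases a1 with h' | h' | h'
    · omega
    · exact ⟨by omega, Or.inr (Or.inl h'), a2, a3, a4, Or.inl ⟨by omega, h'⟩⟩
    · omega

-- a D_-cell passes A's test but fails B's
theorem pv_dcell_A (hm : List (List Int)) (x y h : Int) (hc : pvDCell hm x y h) :
    (y - 1 < 0 ∨ pvGrid hm (y - 1) x = -1 ∨ pvGrid hm (y - 1) x > h)
    ∧ (x + 1 ≥ (hm.headI.length : Int) ∨ pvGrid hm y (x + 1) = -1 ∨ pvGrid hm y (x + 1) > h)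
    ∧ (y + 1 ≥ (hm.length : Int) ∨ pvGrid hm (y + 1) x = -1 ∨ pvGrid hm (y + 1) x > h)
    ∧ (x - 1 < 0 ∨ pvGrid hm y (x - 1) = -1 ∨ pvGrid hm y (x - 1) > h) := by
  obtain ⟨-, a1, a2, a3, a4, -⟩ := hc
  exact ⟨a1, a2, a3, a4⟩

theorem pv_dcell_not_B (hm : List (List Int)) (x y h : Int) (hc : pvDCell hm x y h) :
    ¬((y - 1 < 0 ∨ pvGrid hm (y - 1) x > h)
      ∧ (x + 1 ≥ (hm.headI.length : Int) ∨ pvGrid hm y (x + 1) > h)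
      ∧ (y + 1 ≥ (hm.length : Int) ∨ pvGrid hm (y + 1) x > h)
      ∧ (x - 1 < 0 ∨ pvGrid hm y (x - 1) > h)) := by
  obtain ⟨hh, -, -, -, -, hw⟩ := hc
  rintro ⟨b1, b2, b3, b4⟩
  rcases hw with ⟨hb, hv⟩ | ⟨hb, hv⟩ | ⟨hb, hv⟩ | ⟨hb, hv⟩ <;> omega

-- filter with a pointwise-weaker predicate is no longer
theorem pv_filter_len_le {α : Type} (l : List α) (p q : α → Bool)
    (h : ∀ a ∈ l, p a = true → q a = true) :
    (l.filter p).length ≤ (l.filter q).length := by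
  induction l with
  | nil => simp
  | cons a t ih =>
    have ih' := ih (fun b hb => h b (List.mem_cons_of_mem _ hb))
    by_cases hp : p a = true
    · simp [hp, h a List.mem_cons_self hp]; omega
    · simp only [List.filter_cons]
      rw [if_neg (by simpa using hp)]
      by_cases hq : q a = true
      · simp [hq]; omega
      · rw [if_neg (by simpa using hq)]; exact ih'

-- … and strictly shorter once one member passes q but fails p
theorem pv_filter_len_lt {α : Type} (l : List α) (p q : α → Bool)
    (h : ∀ a ∈ l, p a = true → q a = true)
    (a : α) (ha : a ∈ l) (hq : q a = true) (hp : p a = false) :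
    (l.filter p).length < (l.filter q).length := by
  induction l with
  | nil => simp at ha
  | cons b t ih =>
    have h' : ∀ c ∈ t, p c = true → q c = true := fun c hc => h c (List.mem_cons_of_mem _ hc)
    rcases List.mem_cons.1 ha with rfl | hat
    · simp only [List.filter_cons]
      rw [if_neg (by simp [hp]), if_pos (by simpa using hq)]
      have := pv_filter_len_le t p q h'
      simp; omega
    · have := ih h' hat
      by_cases hpb : p b = true
      · simp only [List.filter_cons]
        rw [if_pos (by simpa using hpb), if_pos (by simpa using h b List.mem_cons_self hpb)]
        simpa using this
      · simp only [List.filter_cons]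
        rw [if_neg (by simpa using hpb)]
        by_cases hqb : q b = true
        · rw [if_pos (by simpa using hqb)]; simp; omega
        · rw [if_neg (by simpa using hqb)]; exact this

-- the nested low-point fold of both ports, flattened to flatMap/filter form
theorem pv_lows_flat {P : (Int × List Int) → (Int × Int) → Bool}
    (L : List (Int × List Int)) (acc : List (Int × Int)) :
    L.foldl (fun acc ir => (PySem.List.enumerate ir.2).foldl
      (fun acc2 jp => if P ir jp then acc2 ++ [(jp.1, ir.1)] else acc2) acc) acc
  = acc ++ L.flatMap (fun ir =>
      ((PySem.List.enumerate ir.2).filter (P ir)).map (fun jp => (jp.1, ir.1))) := by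
  calc L.foldl (fun acc ir => (PySem.List.enumerate ir.2).foldl
      (fun acc2 jp => if P ir jp then acc2 ++ [(jp.1, ir.1)] else acc2) acc) acc
      = L.foldl (fun acc ir =>
          acc ++ ((PySem.List.enumerate ir.2).filter (P ir)).map (fun jp => (jp.1, ir.1))) acc :=
        PySem.List.foldl_congr_mem L _ _ acc (fun acc ir _ =>
          PySem.List.foldl_append_if (P ir) (fun jp => (jp.1, ir.1)) _ acc)
    _ = _ := PySem.List.foldl_append_eq_flatMap _ L acc

-- ===== VERDICT (by name: the statements are the Claim_ definitions above) =====
theorem find_basin_size_list_spec : Claim_unchanged_find_basin_size_list := by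
  intro hm _hdom hpre hnd
  unfold find_basin_size_list find_basin_size_list_alt
  simp only [pv_cond_eq]
  have hlow :
      (PySem.List.enumerate hm).foldl (fun acc ir =>
        (PySem.List.enumerate ir.2).foldl (fun acc2 jp =>
          if decide
            ((ir.1 - 1 < 0 ∨ pvGrid hm (ir.1 - 1) jp.1 = -1 ∨ pvGrid hm (ir.1 - 1) jp.1 > jp.2)
             ∧ (jp.1 + 1 ≥ (hm.headI.length : Int) ∨ pvGrid hm ir.1 (jp.1 + 1) = -1 ∨ pvGrid hm ir.1 (jp.1 + 1) > jp.2)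
             ∧ (ir.1 + 1 ≥ (hm.length : Int) ∨ pvGrid hm (ir.1 + 1) jp.1 = -1 ∨ pvGrid hm (ir.1 + 1) jp.1 > jp.2)
             ∧ (jp.1 - 1 < 0 ∨ pvGrid hm ir.1 (jp.1 - 1) = -1 ∨ pvGrid hm ir.1 (jp.1 - 1) > jp.2))
          then acc2 ++ [(jp.1, ir.1)] else acc2) acc) []
      = (PySem.List.enumerate hm).foldl (fun acc ir =>
        (PySem.List.enumerate ir.2).foldl (fun acc2 jp =>
          if decide
            ((ir.1 - 1 < 0 ∨ pvGrid hm (ir.1 - 1) jp.1 > jp.2)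
             ∧ (jp.1 + 1 ≥ (hm.headI.length : Int) ∨ pvGrid hm ir.1 (jp.1 + 1) > jp.2)
             ∧ (ir.1 + 1 ≥ (hm.length : Int) ∨ pvGrid hm (ir.1 + 1) jp.1 > jp.2)
             ∧ (jp.1 - 1 < 0 ∨ pvGrid hm ir.1 (jp.1 - 1) > jp.2))
          then acc2 ++ [(jp.1, ir.1)] else acc2) acc) [] := by
    apply PySem.List.foldl_congr_mem
    intro acc ir hir
    apply PySem.List.foldl_congr_mem
    intro acc2 jp hjp
    have hnc : ¬ pvDCell hm jp.1 ir.1 jp.2 :=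
      fun hc => hnd (pv_dcell_to_D hm hpre.2 hir hjp hc)
    have hdd : decide
        ((ir.1 - 1 < 0 ∨ pvGrid hm (ir.1 - 1) jp.1 = -1 ∨ pvGrid hm (ir.1 - 1) jp.1 > jp.2)
         ∧ (jp.1 + 1 ≥ (hm.headI.length : Int) ∨ pvGrid hm ir.1 (jp.1 + 1) = -1 ∨ pvGrid hm ir.1 (jp.1 + 1) > jp.2)
         ∧ (ir.1 + 1 ≥ (hm.length : Int) ∨ pvGrid hm (ir.1 + 1) jp.1 = -1 ∨ pvGrid hm (ir.1 + 1) jp.1 > jp.2)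
         ∧ (jp.1 - 1 < 0 ∨ pvGrid hm ir.1 (jp.1 - 1) = -1 ∨ pvGrid hm ir.1 (jp.1 - 1) > jp.2))
        = decide
        ((ir.1 - 1 < 0 ∨ pvGrid hm (ir.1 - 1) jp.1 > jp.2)
         ∧ (jp.1 + 1 ≥ (hm.headI.length : Int) ∨ pvGrid hm ir.1 (jp.1 + 1) > jp.2)
         ∧ (ir.1 + 1 ≥ (hm.length : Int) ∨ pvGrid hm (ir.1 + 1) jp.1 > jp.2)
         ∧ (jp.1 - 1 < 0 ∨ pvGrid hm ir.1 (jp.1 - 1) > jp.2)) := by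
      rw [decide_eq_decide]
      constructor
      · intro hA
        by_contra hB
        exact hnc (pv_A_not_B hm jp.1 ir.1 jp.2 hA hB)
      · exact pv_B_imp_A hm jp.1 ir.1 jp.2
    rw [hdd]
  rw [hlow]
  rw [PySem.List.foldl_append_singleton_eq_map, PySem.List.foldl_append_singleton_eq_map]
  rw [List.nil_append, List.nil_append]
  exact List.map_congr_left (fun p _ => pv_fill_eq hm p)

theorem find_basin_size_list_changed : Claim_changed_find_basin_size_list := by
  unfold Claim_changed_find_basin_size_list
  decide

theorem find_basin_size_list_tight : Claim_exact_find_basin_size_list := by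
  intro hm _hdom hpre hd heq
  obtain ⟨p, hp, q, hq, hc⟩ := pv_D_to_dcell hm hpre.2 hd
  have hlen := congrArg List.length heq
  unfold find_basin_size_list find_basin_size_list_alt at hlen
  simp only [pv_cond_eq] at hlen
  rw [PySem.List.foldl_append_singleton_eq_map, PySem.List.foldl_append_singleton_eq_map,
    List.nil_append, List.nil_append, List.length_map, List.length_map,
    pv_lows_flat, pv_lows_flat, List.nil_append, List.nil_append,
    List.length_flatMap, List.length_flatMap] at hlen
  simp only [List.length_map] at hlen
  have hle : ∀ ir ∈ PySem.List.enumerate hm,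
      ((PySem.List.enumerate ir.2).filter (fun jp => decide
        ((ir.1 - 1 < 0 ∨ pvGrid hm (ir.1 - 1) jp.1 > jp.2)
         ∧ (jp.1 + 1 ≥ (hm.headI.length : Int) ∨ pvGrid hm ir.1 (jp.1 + 1) > jp.2)
         ∧ (ir.1 + 1 ≥ (hm.length : Int) ∨ pvGrid hm (ir.1 + 1) jp.1 > jp.2)
         ∧ (jp.1 - 1 < 0 ∨ pvGrid hm ir.1 (jp.1 - 1) > jp.2)))).length
      ≤ ((PySem.List.enumerate ir.2).filter (fun jp => decide
        ((ir.1 - 1 < 0 ∨ pvGrid hm (ir.1 - 1) jp.1 = -1 ∨ pvGrid hm (ir.1 - 1) jp.1 > jp.2)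
         ∧ (jp.1 + 1 ≥ (hm.headI.length : Int) ∨ pvGrid hm ir.1 (jp.1 + 1) = -1 ∨ pvGrid hm ir.1 (jp.1 + 1) > jp.2)
         ∧ (ir.1 + 1 ≥ (hm.length : Int) ∨ pvGrid hm (ir.1 + 1) jp.1 = -1 ∨ pvGrid hm (ir.1 + 1) jp.1 > jp.2)
         ∧ (jp.1 - 1 < 0 ∨ pvGrid hm ir.1 (jp.1 - 1) = -1 ∨ pvGrid hm ir.1 (jp.1 - 1) > jp.2)))).length := by
    intro ir _
    apply pv_filter_len_le
    intro a _ ha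
    rw [decide_eq_true_eq] at ha
    exact decide_eq_true (pv_B_imp_A hm a.1 ir.1 a.2 ha)
  have hstrict :
      ((PySem.List.enumerate p.2).filter (fun jp => decide
        ((p.1 - 1 < 0 ∨ pvGrid hm (p.1 - 1) jp.1 > jp.2)
         ∧ (jp.1 + 1 ≥ (hm.headI.length : Int) ∨ pvGrid hm p.1 (jp.1 + 1) > jp.2)
         ∧ (p.1 + 1 ≥ (hm.length : Int) ∨ pvGrid hm (p.1 + 1) jp.1 > jp.2)
         ∧ (jp.1 - 1 < 0 ∨ pvGrid hm p.1 (jp.1 - 1) > jp.2)))).length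
      < ((PySem.List.enumerate p.2).filter (fun jp => decide
        ((p.1 - 1 < 0 ∨ pvGrid hm (p.1 - 1) jp.1 = -1 ∨ pvGrid hm (p.1 - 1) jp.1 > jp.2)
         ∧ (jp.1 + 1 ≥ (hm.headI.length : Int) ∨ pvGrid hm p.1 (jp.1 + 1) = -1 ∨ pvGrid hm p.1 (jp.1 + 1) > jp.2)
         ∧ (p.1 + 1 ≥ (hm.length : Int) ∨ pvGrid hm (p.1 + 1) jp.1 = -1 ∨ pvGrid hm (p.1 + 1) jp.1 > jp.2)
         ∧ (jp.1 - 1 < 0 ∨ pvGrid hm p.1 (jp.1 - 1) = -1 ∨ pvGrid hm p.1 (jp.1 - 1) > jp.2)))).length := by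
    apply pv_filter_len_lt _ _ _ ?_ q hq
    · exact decide_eq_true (pv_dcell_A hm q.1 p.1 q.2 hc)
    · exact decide_eq_false (pv_dcell_not_B hm q.1 p.1 q.2 hc)
    · intro a _ ha
      rw [decide_eq_true_eq] at ha
      exact decide_eq_true (pv_B_imp_A hm a.1 p.1 a.2 ha)
  have hlt := List.sum_lt_sum _ _ hle ⟨p, hp, hstrict⟩
  omega
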